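-- pv_equiv track=rewrite | github.com/cidrblock/pylint-ruff-sync | src/pylint_ruff_sync/pyproject_updater.py | _generate_new_disable_content
-- ===== SOURCE A (Python) =====
-- from typing import TYPE_CHECKING, Any, ClassVar
--
-- def _generate_new_disable_content(pylint_config: dict[str, Any]) -> str:
--     """Generate the new disable section content.
--
--     Args:
--         pylint_config: The pylint configuration dictionary.
--
--     Returns:
--         The formatted disable section string.
--
--     """
--     disable_list = pylint_config.get("disable", [])
--
--     if not disable_list:
--         return ""
--
--     # Handle inline format for single "all" item
--     if len(disable_list) == 1 and disable_list[0] == "all":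
--         return 'disable = ["all"]'
--
--     # Handle multiline format for multiple items
--     new_disable_lines = ["disable = ["]
--     for i, rule_code in enumerate(disable_list):
--         is_last = i == len(disable_list) - 1
--         comma = "" if is_last else ","
--         new_disable_lines.append(f'  "{rule_code}"{comma}')
--     new_disable_lines.append("]")
--     return "\n".join(new_disable_lines)
-- ===== SOURCE B (Python) =====
-- def _generate_new_disable_content(pylint_config):
--     """Generate the new disable section content (recursive leading-separator build)."""
--     disable_list = pylint_config.get("disable", [])
--     if not disable_list:
--         return ""
--     if disable_list == ["all"]:
--         return 'disable = ["all"]'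
--
--     def rest(items):
--         if not items:
--             return "\n]"
--         return ',\n  "' + items[0] + '"' + rest(items[1:])
--
--     return 'disable = [\n  "' + disable_list[0] + '"' + rest(disable_list[1:])
-- ===== Notes on version B (the rewrite author's own statement) =====
-- stated objective: alternative
-- what changed: A builds a list of lines with an enumerate loop that decides each line's trailing comma via an is_last flag and finally joins with '\n'; B builds the result string directly by structural recursion with no line list, no index and no join, emitting the first item and then each remaining item prefixed by its leading ',\n' separator.
import Mathlib
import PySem

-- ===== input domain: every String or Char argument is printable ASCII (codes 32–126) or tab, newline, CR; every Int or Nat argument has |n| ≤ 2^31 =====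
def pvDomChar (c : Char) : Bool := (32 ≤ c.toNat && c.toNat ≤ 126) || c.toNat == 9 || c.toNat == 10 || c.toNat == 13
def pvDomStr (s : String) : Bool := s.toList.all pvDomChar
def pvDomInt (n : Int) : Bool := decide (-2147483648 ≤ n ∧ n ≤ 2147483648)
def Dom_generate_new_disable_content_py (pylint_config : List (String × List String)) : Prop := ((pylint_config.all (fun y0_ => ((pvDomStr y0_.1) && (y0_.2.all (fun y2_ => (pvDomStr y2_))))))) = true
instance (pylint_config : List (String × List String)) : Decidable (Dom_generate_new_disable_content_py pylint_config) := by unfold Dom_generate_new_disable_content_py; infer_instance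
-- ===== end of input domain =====

-- B drops the line list, the enumerate/is_last comma branch and the final join: it builds the
-- string directly by structural recursion, each item after the first carrying its LEADING ",\n"
-- separator (objective: simpler / alternative decomposition).

-- ===== PORT A =====
def generate_new_disable_content_py (pylint_config : List (String × List String)) : String :=
  let disable_list := (PySem.Dict.mk pylint_config).getD "disable" []
  if disable_list = [] then ""
  else if disable_list.length = 1 ∧ PySem.List.pyGetD disable_list 0 "" = "all" then
    "disable = [\"all\"]"
  else
    let new_disable_lines := ["disable = ["]
    let new_disable_lines := (PySem.List.enumerate disable_list).foldl
      (fun acc p =>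
        let is_last := p.1 = (disable_list.length : Int) - 1
        let comma := if is_last then "" else ","
        acc ++ ["  \"" ++ p.2 ++ "\"" ++ comma]) new_disable_lines
    let new_disable_lines := new_disable_lines ++ ["]"]
    PySem.Str.join "\n" new_disable_lines

-- ===== PORT B =====
-- B's inner recursive helper `rest`: items[0] / items[1:] recursion = structural recursion.
def pvAltRest : List String → String
  | [] => "\n]"
  | x :: xs => ",\n  \"" ++ x ++ "\"" ++ pvAltRest xs

def generate_new_disable_content_py_alt (pylint_config : List (String × List String)) : String :=
  let disable_list := (PySem.Dict.mk pylint_config).getD "disable" []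
  match disable_list with
  | [] => ""
  | a :: t =>
    if a :: t = ["all"] then "disable = [\"all\"]"
    else "disable = [\n  \"" ++ a ++ "\"" ++ pvAltRest t

-- ===== PRECONDITION & SPEC =====
def Spec_generate_new_disable_content_py (pylint_config : List (String × List String)) (out : String) : Prop := out = generate_new_disable_content_py_alt pylint_config
instance (pylint_config : List (String × List String)) (out : String) : Decidable (Spec_generate_new_disable_content_py pylint_config out) := by unfold Spec_generate_new_disable_content_py; infer_instance

-- ===== CLAIM (what is proved, stated in full; the proofs are below) =====
def Claim_equal_generate_new_disable_content_py : Prop := ∀ (pylint_config : List (String × List String)), Dom_generate_new_disable_content_py pylint_config → Spec_generate_new_disable_content_py pylint_config (generate_new_disable_content_py pylint_config)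

-- ===== LEMMAS AND PROOFS =====

-- join over a list with a trailing element (the closing "]") splits off.
theorem join_snoc (sep y : List Char) : ∀ (xs : List (List Char)), xs ≠ [] →
    PySem.Chars.join sep (xs ++ [y]) = PySem.Chars.join sep xs ++ sep ++ y := by
  intro xs
  induction xs with
  | nil => intro h; exact absurd rfl h
  | cons a t ih =>
    intro _
    cases t with
    | nil => simp [PySem.Chars.join_cons_cons, PySem.Chars.join_singleton]
    | cons b r =>
      have := ih (by simp)
      simp only [List.cons_append, PySem.Chars.join_cons_cons] at *
      simp [this]

-- the comma-except-last lines joined by "\n" equal the plain lines joined by ",\n"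
theorem join_comma_lines (f : String → List Char) : ∀ (l : List String), l ≠ [] →
    ∀ (s e : Int), e = s + (l.length : Int) - 1 →
    PySem.Chars.join ['\n']
      ((PySem.List.enumerate l s).map
        (fun p => f p.2 ++ (if p.1 = e then [] else [','])))
    = PySem.Chars.join [',', '\n'] (l.map f) := by
  intro l
  induction l with
  | nil => intro h; exact absurd rfl h
  | cons a t ih =>
    intro _ s e he
    cases t with
    | nil =>
      have hse : s = e := by simp at he; omega
      simp [PySem.List.enumerate_cons, PySem.List.enumerate_nil, hse,
            PySem.Chars.join_singleton]
    | cons b r =>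
      have hne : ¬ (s = e) := by simp at he; omega
      have ih' := ih (by simp) (s + 1) e (by simp at he ⊢; omega)
      simp only [PySem.List.enumerate_cons, List.map_cons] at ih' ⊢
      rw [if_neg hne, PySem.Chars.join_cons_cons, PySem.Chars.join_cons_cons, ih']
      simp

-- the whole multiline branch of A, at the character level, as a ",\n"-join
theorem chars_multiline (hd : List Char) (f : String → List Char) (l : List String) (h : l ≠ []) :
    PySem.Chars.join ['\n']
      (hd :: ((PySem.List.enumerate l).map
        (fun p => f p.2 ++ (if p.1 = (l.length : Int) - 1 then [] else [','])) ++ [[']']]))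
    = hd ++ ['\n'] ++ PySem.Chars.join [',', '\n'] (l.map f) ++ ['\n', ']'] := by
  have hmid : (PySem.List.enumerate l).map
      (fun p => f p.2 ++ (if p.1 = (l.length : Int) - 1 then [] else [','])) ≠ [] := by
    cases l with
    | nil => exact absurd rfl h
    | cons a t => simp [PySem.List.enumerate_cons]
  have hkey := join_comma_lines f l h 0 ((l.length : Int) - 1) (by omega)
  obtain ⟨m, ms, hm⟩ := List.exists_cons_of_ne_nil hmid
  rw [hm, show hd :: ((m :: ms) ++ [[']']]) = hd :: m :: (ms ++ [[']']]) from rfl,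
      PySem.Chars.join_cons_cons,
      show m :: (ms ++ [[']']]) = (m :: ms) ++ [[']']] from rfl,
      join_snoc _ _ _ (by simp), ← hm, hkey]
  simp

-- the ",\n"-join followed by the closing "\n]" equals B's leading-separator recursion, char level
theorem chars_altRest : ∀ (t : List String) (a : String),
    PySem.Chars.join [',', '\n'] ((a :: t).map (fun s => "  \"".toList ++ s.toList ++ "\"".toList))
      ++ ['\n', ']']
    = ("  \"".toList ++ a.toList ++ "\"".toList) ++ (pvAltRest t).toList := by
  intro t
  induction t with
  | nil =>
    intro a
    simp [PySem.Chars.join_singleton, pvAltRest]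
  | cons b r ih =>
    intro a
    simp only [List.map_cons, PySem.Chars.join_cons_cons]
    have hb := ih b
    simp only [List.map_cons] at hb
    rw [List.append_assoc, List.append_assoc, hb]
    simp [pvAltRest]

-- the multiline branch: A's line-list/join form equals B's recursive form (string level)
theorem multiline_eq (a : String) (t : List String) :
    PySem.Str.join "\n"
      ((["disable = ["] ++ (PySem.List.enumerate (a :: t)).map
        (fun p => "  \"" ++ p.2 ++ "\"" ++ (if p.1 = ((a :: t).length : Int) - 1 then "" else ","))) ++ ["]"])
    = "disable = [\n  \"" ++ a ++ "\"" ++ pvAltRest t := by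
  apply String.toList_inj.mp
  have H := chars_multiline ("disable = [".toList)
      (fun s => "  \"".toList ++ (s.toList ++ "\"".toList)) (a :: t) (by simp)
  have K := chars_altRest t a
  have e1 : "\n".toList = ['\n'] := by decide
  have e3 : "]".toList = [']'] := by decide
  have e6 : "".toList = [] := by decide
  have e7 : ",".toList = [','] := by decide
  simp only [pysem, e1, e3, e6, e7, String.toList_append, List.map_append,
             List.map_cons, List.map_map, List.map_nil, Function.comp_def,
             apply_ite String.toList, List.append_assoc, List.cons_append,
             List.nil_append] at H K ⊢
  rw [H]
  rw [K]
  have e8 : "disable = [\n  \"".toList = "disable = [".toList ++ '\n' :: "  \"".toList := by decide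
  simp [e8]

theorem generate_new_disable_content_py_spec : Claim_equal_generate_new_disable_content_py := by
  intro cfg _
  unfold Spec_generate_new_disable_content_py generate_new_disable_content_py
    generate_new_disable_content_py_alt
  simp only []
  generalize (PySem.Dict.mk cfg).getD "disable" [] = dl
  cases dl with
  | nil => simp
  | cons a t =>
    cases t with
    | nil =>
      have hget : PySem.List.pyGetD [a] (0 : Int) "" = a := by
        simp [PySem.List.pyGetD, PySem.List.pyGet?, PySem.List.pyIdx?]
      by_cases ha : a = "all"
      · subst ha; decide
      · have hA : ¬ ([a].length = 1 ∧ PySem.List.pyGetD [a] (0 : Int) "" = "all") := by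
          simp [hget, ha]
        rw [if_neg (by simp), if_neg hA, PySem.List.foldl_append_singleton_eq_map]
        exact (multiline_eq a []).trans (by simp [ha])
    | cons b r =>
      have hA : ¬ ((a :: b :: r).length = 1 ∧
          PySem.List.pyGetD (a :: b :: r) (0 : Int) "" = "all") := by simp
      rw [if_neg (by simp), if_neg hA, PySem.List.foldl_append_singleton_eq_map]
      exact (multiline_eq a (b :: r)).trans (by simp)
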